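-- pv_equiv track=rewrite | github.com/EZDevanshu/Leet_Code | Leet_3880.py | minAbsoluteDifference
-- ===== SOURCE A (Python) =====
-- def minAbsoluteDifference(nums: list[int]) -> int:
--     idx1 = -1
--     idx2 = -1
--     res = float('inf')
--     for i in range(len(nums)) :
--         if nums[i] == 1 :
--             idx1 = i
--             if idx2 != -1 :
--                 res = min(abs(idx1 - idx2) , res)
--         elif nums[i] == 2 :
--             idx2 = i
--             if idx1 != -1 :
--                 res = min(abs(idx1 - idx2) , res)
--
--     return -1 if res == float('inf') else res
-- ===== SOURCE B (Python) =====
-- def minAbsoluteDifference(nums: list[int]) -> int: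
--     ones = [i for i, v in enumerate(nums) if v == 1]
--     twos = [i for i, v in enumerate(nums) if v == 2]
--     if not ones or not twos:
--         return -1
--     best = abs(ones[0] - twos[0])
--     p = 0
--     q = 0
--     while p < len(ones) and q < len(twos):
--         best = min(best, abs(ones[p] - twos[q]))
--         if ones[p] < twos[q]:
--             p += 1
--         else:
--             q += 1
--     return best
-- ===== Notes on version B (the rewrite author's own statement) =====
-- stated objective: alternative
-- what changed: A tracks last-seen indices of 1 and 2 with a running minimum in a single stateful pass; B instead collects the two sorted index lists of 1s and 2s and computes the minimum gap by a two-pointer merge over them.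
import Mathlib
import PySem

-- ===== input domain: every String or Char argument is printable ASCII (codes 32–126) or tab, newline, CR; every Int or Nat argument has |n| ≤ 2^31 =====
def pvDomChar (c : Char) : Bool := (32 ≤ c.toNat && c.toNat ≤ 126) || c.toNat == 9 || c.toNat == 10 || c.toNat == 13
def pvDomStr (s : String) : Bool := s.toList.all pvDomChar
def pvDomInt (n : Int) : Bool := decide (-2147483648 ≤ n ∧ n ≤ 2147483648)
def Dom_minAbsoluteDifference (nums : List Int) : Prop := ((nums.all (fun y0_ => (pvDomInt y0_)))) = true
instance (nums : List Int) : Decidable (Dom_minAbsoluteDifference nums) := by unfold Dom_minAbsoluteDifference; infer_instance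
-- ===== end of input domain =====

-- B replaces A's single-pass last-seen-index tracker by collecting the index lists of 1s and 2s
-- and running a two-pointer merge over them (objective: alternative; same value on every input).

-- ===== PORT A =====
-- A's loop body: state (idx1, idx2, res); res models Python's float('inf') sentinel as
-- `none` (exact: res is `inf` until the first pair, an int afterwards, and
-- min(int, inf) = the int).
def aStep (s : Int × Int × Option Int) (iv : Int × Int) : Int × Int × Option Int :=
  match s with
  | (idx1, idx2, res) =>
    if iv.2 = 1 then
      let idx1 := iv.1
      if idx2 ≠ -1 then
        (idx1, idx2, some (match res with | none => |idx1 - idx2| | some r => min |idx1 - idx2| r))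
      else (idx1, idx2, res)
    else if iv.2 = 2 then
      let idx2 := iv.1
      if idx1 ≠ -1 then
        (idx1, idx2, some (match res with | none => |idx1 - idx2| | some r => min |idx1 - idx2| r))
      else (idx1, idx2, res)
    else (idx1, idx2, res)

def minAbsoluteDifference (nums : List Int) : Int :=
  -- `for i in range(len(nums)) : … nums[i] …` = fold over the indexed elements
  let s := (PySem.List.enumerate nums 0).foldl aStep (-1, -1, none)
  match s.2.2 with
  | none => -1       -- res == float('inf')
  | some r => r

-- ===== PORT B =====
-- the two comprehensions `[i for i, v in enumerate(nums) if v == w]`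
def idxWhereEq (w : Int) (nums : List Int) : List Int :=
  (PySem.List.enumerate nums 0).filterMap (fun iv => if iv.2 = w then some iv.1 else none)

-- the `while p < len(ones) and q < len(twos)` two-pointer loop
def tpMerge : List Int → List Int → Int → Int
  | [], _, best => best
  | _ :: _, [], best => best
  | x :: a, y :: b, best =>
    let best' := min best |x - y|
    if x < y then tpMerge a (y :: b) best' else tpMerge (x :: a) b best'
termination_by a b _ => a.length + b.length

def minAbsoluteDifference_alt (nums : List Int) : Int :=
  let ones := idxWhereEq 1 nums
  let twos := idxWhereEq 2 nums
  match ones, twos with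
  | [], _ => -1
  | _ :: _, [] => -1
  | x :: a, y :: b => tpMerge (x :: a) (y :: b) |x - y|

-- ===== PRECONDITION & SPEC =====
def Spec_minAbsoluteDifference (nums : List Int) (out : Int) : Prop := out = minAbsoluteDifference_alt nums
instance (nums : List Int) (out : Int) : Decidable (Spec_minAbsoluteDifference nums out) := by unfold Spec_minAbsoluteDifference; infer_instance

-- ===== CLAIM (what is proved, stated in full; the proofs are below) =====
def Claim_equal_minAbsoluteDifference : Prop := ∀ (nums : List Int), Dom_minAbsoluteDifference nums → Spec_minAbsoluteDifference nums (minAbsoluteDifference nums)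

-- ===== LEMMAS AND PROOFS =====

-- `omin o v` = `min(v, o)` with `o` an int-or-infinity
def omin (o : Option Int) (v : Int) : Option Int :=
  match o with
  | none => some v
  | some r => some (min r v)

-- the multiset of all |i - j| with nums[i] = 1 and nums[j] = 2
def diffs (nums : List Int) : List Int :=
  (idxWhereEq 1 nums).flatMap (fun i => (idxWhereEq 2 nums).map (fun j => |i - j|))

theorem omin_rcomm : RightCommutative omin := by
  constructor
  intro b a₁ a₂
  cases b <;> simp [omin, min_assoc, min_comm a₁ a₂]

theorem min_rcomm : RightCommutative (min : Int → Int → Int) := ⟨min_right_comm⟩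

theorem foldl_min_const {l : List Int} {c : Int} (h : ∀ z ∈ l, c ≤ z) :
    l.foldl min c = c := by
  induction l with
  | nil => rfl
  | cons v l ih =>
    simp only [List.foldl_cons, min_eq_left (h v (by simp))]
    exact ih (fun z hz => h z (by simp [hz]))

theorem foldl_omin_some (l : List Int) (c : Int) :
    l.foldl omin (some c) = some (l.foldl min c) := by
  induction l generalizing c with
  | nil => rfl
  | cons v l ih => simp [omin, ih]

-- pulling the per-element head out of a flatMap, up to permutation
theorem flatMap_cons_perm {α β : Type} (l : List α) (f : α → β) (g : α → List β) :
    (l.flatMap (fun i => f i :: g i)).Perm (l.map f ++ l.flatMap g) := by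
  induction l with
  | nil => simp
  | cons i l ih =>
    simp only [List.flatMap_cons, List.map_cons, List.cons_append]
    refine List.Perm.cons _ ?_
    refine (ih.append_left (g i)).trans ?_
    rw [← List.append_assoc, ← List.append_assoc]
    exact (List.perm_append_comm).append_right _

-- pulling the per-element last out of a flatMap, up to permutation
theorem flatMap_concat_perm {α β : Type} (l : List α) (g : α → List β) (h : α → β) :
    (l.flatMap (fun i => g i ++ [h i])).Perm (l.flatMap g ++ l.map h) := by
  induction l with
  | nil => simp
  | cons i l ih =>
    simp only [List.flatMap_cons, List.map_cons]
    refine (ih.append_left (g i ++ [h i])).trans ?_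
    have hmid : ((h i) :: (l.flatMap g ++ l.map h)).Perm (l.flatMap g ++ (h i) :: l.map h) :=
      List.perm_middle.symm
    have := hmid.append_left (g i)
    rw [List.append_assoc, List.append_assoc]
    simpa using this

-- a fold of `omin` over the f-image of t collapses to its minimum f(getLast t)
theorem foldl_omin_collapse (t : List Int) (ht : t ≠ []) (f : Int → Int) (R : Option Int)
    (hmin : ∀ j ∈ t, f (t.getLast ht) ≤ f j) :
    (t.map f).foldl omin R = omin R (f (t.getLast ht)) := by
  have hperm : (t.map f).Perm (f (t.getLast ht) :: (t.dropLast.map f)) := by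
    conv_lhs => rw [← List.dropLast_append_getLast ht]
    rw [List.map_append]
    exact (List.perm_append_comm (l₁ := t.dropLast.map f)
      (l₂ := [f (t.getLast ht)])).trans (by simp)
  rw [hperm.foldl_eq (rcomm := omin_rcomm) R]
  simp only [List.foldl_cons]
  have hR : ∃ c, omin R (f (t.getLast ht)) = some c ∧ c ≤ f (t.getLast ht) := by
    cases R with
    | none => exact ⟨_, rfl, le_refl _⟩
    | some r => exact ⟨_, rfl, min_le_right _ _⟩
  obtain ⟨c, hc, hcle⟩ := hR
  rw [hc, foldl_omin_some]
  congr 1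
  apply foldl_min_const
  intro z hz
  obtain ⟨j, hj, rfl⟩ := List.mem_map.mp hz
  exact le_trans hcle (hmin j (List.dropLast_subset _ hj))

-- elements of idxWhereEq are the positions 0 ≤ i < len
theorem mem_idxWhereEq {w : Int} {nums : List Int} {i : Int} (h : i ∈ idxWhereEq w nums) :
    0 ≤ i ∧ i < (nums.length : Int) := by
  unfold idxWhereEq at h
  obtain ⟨⟨j, v⟩, hm, hf⟩ := List.mem_filterMap.mp h
  by_cases hv : v = w
  · simp [hv] at hf
    obtain ⟨k, hk, hp⟩ := (PySem.List.mem_enumerate_iff _ _ _).mp hm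
    obtain ⟨rfl, -⟩ := Prod.mk.injEq .. ▸ (by exact hp : (j, v) = (0 + (k : Int), nums[k]))
    omega
  · simp [hv] at hf

theorem pairwise_idxWhereEq (w : Int) (nums : List Int) :
    (idxWhereEq w nums).Pairwise (· < ·) := by
  unfold idxWhereEq
  refine List.Pairwise.filterMap _ ?_ (PySem.List.pairwise_lt_enumerate nums 0)
  intro a a' hlt b hb b' hb'
  by_cases h1 : a.2 = w
  · by_cases h2 : a'.2 = w
    · simp [h1, h2] at hb hb'; omega
    · simp [h2] at hb'
  · simp [h1] at hb

theorem pairwise_le_idxWhereEq (w : Int) (nums : List Int) :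
    (idxWhereEq w nums).Pairwise (· ≤ ·) :=
  (pairwise_idxWhereEq w nums).imp (fun h => le_of_lt h)

theorem le_getLast_of_pairwise {l : List Int} (hp : l.Pairwise (· ≤ ·)) (hne : l ≠ [])
    {j : Int} (hj : j ∈ l) : j ≤ l.getLast hne := by
  induction l with
  | nil => simp at hj
  | cons a t ih =>
    cases t with
    | nil => simp at hj; simp [hj, List.getLast]
    | cons b t' =>
      rw [List.getLast_cons (by simp)]
      rcases List.mem_cons.mp hj with rfl | hj'
      · exact le_trans (List.rel_of_pairwise_cons hp (List.getLast_mem _))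
          (le_refl _)
      · exact ih (List.Pairwise.sublist (List.sublist_cons_self _ _) hp) (by simp) hj'

theorem getLastD_eq_getLast {l : List Int} (hne : l ≠ []) (d : Int) :
    l.getLastD d = l.getLast hne := by
  cases l with
  | nil => simp at hne
  | cons a t => simp [List.getLastD_eq_getLast?, List.getLast?_eq_some_getLast]

-- idxWhereEq over a snoc
theorem idxWhereEq_append (w : Int) (xs : List Int) (x : Int) :
    idxWhereEq w (xs ++ [x]) =
      idxWhereEq w xs ++ (if x = w then [((xs.length : Int))] else []) := by
  unfold idxWhereEq
  rw [PySem.List.enumerate_append, List.filterMap_append]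
  congr 1
  simp [PySem.List.enumerate]
  split <;> simp_all

-- the A-side loop invariant
theorem A_state (xs : List Int) :
    (PySem.List.enumerate xs 0).foldl aStep (-1, -1, none) =
      ((idxWhereEq 1 xs).getLastD (-1), (idxWhereEq 2 xs).getLastD (-1),
       (diffs xs).foldl omin none) := by
  induction xs using List.reverseRecOn with
  | nil => rfl
  | append_singleton xs x ih =>
    rw [PySem.List.enumerate_append, List.foldl_append, ih]
    have hen : PySem.List.enumerate [x] (0 + (xs.length : Int)) = [(((xs.length : Int)), x)] := by
      simp [PySem.List.enumerate]
    rw [hen, List.foldl_cons, List.foldl_nil]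
    rcases eq_or_ne x 1 with rfl | hx1
    · -- a 1 appended at index n = len xs
      have hone' : idxWhereEq 1 (xs ++ [1]) = idxWhereEq 1 xs ++ [((xs.length : Int))] := by
        rw [idxWhereEq_append]; simp
      have htwo' : idxWhereEq 2 (xs ++ [1]) = idxWhereEq 2 xs := by
        rw [idxWhereEq_append]; norm_num
      have hd : diffs (xs ++ [1]) =
          diffs xs ++ (idxWhereEq 2 xs).map (fun j => |((xs.length : Int)) - j|) := by
        unfold diffs; rw [hone', htwo', List.flatMap_append]; simp
      rw [hone', htwo', hd, List.getLastD_concat, List.foldl_append]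
      rcases eq_or_ne (idxWhereEq 2 xs) [] with hT | hT
      · simp [hT, aStep]
      · have hg := getLastD_eq_getLast hT (-1)
        have hmem := mem_idxWhereEq (List.getLast_mem hT) (w := 2) (nums := xs)
        have hne2 : (idxWhereEq 2 xs).getLastD (-1) ≠ -1 := by rw [hg]; omega
        have hcol := foldl_omin_collapse (idxWhereEq 2 xs) hT
          (fun j => |((xs.length : Int)) - j|) ((diffs xs).foldl omin none) ?_
        · rw [hcol]
          unfold aStep
          simp only [if_neg (by norm_num : (1 : Int) ≠ 2), hne2, ne_eq, not_false_iff, if_pos]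
          refine Prod.ext rfl (Prod.ext rfl ?_)
          simp only [hg, omin]
          cases (diffs xs).foldl omin none with
          | none => rfl
          | some r => simp [min_comm]
        · intro j hj
          have hjm := mem_idxWhereEq hj
          have hjl := le_getLast_of_pairwise (pairwise_le_idxWhereEq 2 xs) hT hj
          show |((xs.length : Int)) - (idxWhereEq 2 xs).getLast hT| ≤ |((xs.length : Int)) - j|
          rw [abs_of_nonneg (by omega), abs_of_nonneg (by omega)]
          omega
    · rcases eq_or_ne x 2 with rfl | hx2
      · -- a 2 appended at index n = len xs
        have hone' : idxWhereEq 1 (xs ++ [2]) = idxWhereEq 1 xs := by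
          rw [idxWhereEq_append]; norm_num
        have htwo' : idxWhereEq 2 (xs ++ [2]) = idxWhereEq 2 xs ++ [((xs.length : Int))] := by
          rw [idxWhereEq_append]; simp
        have hd : diffs (xs ++ [2]) =
            (idxWhereEq 1 xs).flatMap
              (fun i => (idxWhereEq 2 xs).map (fun j => |i - j|) ++ [|i - ((xs.length : Int))|]) := by
          unfold diffs; rw [hone', htwo']; simp [List.map_append]
        have hperm := flatMap_concat_perm (idxWhereEq 1 xs)
          (fun i => (idxWhereEq 2 xs).map (fun j => |i - j|))
          (fun i => |i - ((xs.length : Int))|)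
        rw [hone', htwo', hd, List.getLastD_concat,
          hperm.foldl_eq (rcomm := omin_rcomm) none, List.foldl_append]
        rcases eq_or_ne (idxWhereEq 1 xs) [] with hO | hO
        · simp [hO, aStep, diffs]
        · have hg := getLastD_eq_getLast hO (-1)
          have hmem := mem_idxWhereEq (List.getLast_mem hO) (w := 1) (nums := xs)
          have hne1 : (idxWhereEq 1 xs).getLastD (-1) ≠ -1 := by rw [hg]; omega
          have hcol := foldl_omin_collapse (idxWhereEq 1 xs) hO
            (fun i => |i - ((xs.length : Int))|) ((diffs xs).foldl omin none) ?_
          · have hfold : List.flatMap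
                (fun i => List.map (fun j => |i - j|) (idxWhereEq 2 xs)) (idxWhereEq 1 xs) =
                diffs xs := rfl
            rw [hfold, hcol]
            unfold aStep
            simp only [if_neg (by norm_num : (2 : Int) ≠ 1), hne1, ne_eq, not_false_iff, if_pos]
            refine Prod.ext rfl (Prod.ext rfl ?_)
            simp only [hg, omin]
            cases (diffs xs).foldl omin none with
            | none => rfl
            | some r => simp [min_comm]
          · intro i hi
            have him := mem_idxWhereEq hi
            have hil := le_getLast_of_pairwise (pairwise_le_idxWhereEq 1 xs) hO hi
            show |(idxWhereEq 1 xs).getLast hO - ((xs.length : Int))| ≤ |i - ((xs.length : Int))|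
            rw [abs_of_nonpos (by omega), abs_of_nonpos (by omega)]
            omega
      · -- neither a 1 nor a 2: nothing changes
        have hone' : idxWhereEq 1 (xs ++ [x]) = idxWhereEq 1 xs := by
          rw [idxWhereEq_append]; simp [hx1]
        have htwo' : idxWhereEq 2 (xs ++ [x]) = idxWhereEq 2 xs := by
          rw [idxWhereEq_append]; simp [hx2]
        have hd : diffs (xs ++ [x]) = diffs xs := by unfold diffs; rw [hone', htwo']
        rw [hone', htwo', hd]
        unfold aStep
        simp [hx1, hx2]

-- the B-side two-pointer lemma
theorem tpMerge_eq (a b : List Int) (best : Int)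
    (ha : a.Pairwise (· ≤ ·)) (hb : b.Pairwise (· ≤ ·)) :
    tpMerge a b best = (a.flatMap (fun i => b.map (fun j => |i - j|))).foldl min best := by
  revert ha hb
  fun_induction tpMerge a b best with
  | case1 b best => intro _ _; simp
  | case2 x a best =>
    intro _ _
    have hz : List.flatMap (fun (_ : Int) => ([] : List Int)) a = [] := by simp
    simp [hz]
  | case3 x a y b best best' h ih =>
    intro ha hb
    have ha' := (List.pairwise_cons.mp ha).2
    rw [ih ha' hb]
    simp only [List.flatMap_cons, List.map_cons, List.foldl_append, List.foldl_cons]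
    congr 1
    apply (foldl_min_const ?_).symm
    intro z hz
    obtain ⟨j, hj, rfl⟩ := List.mem_map.mp hz
    have hyj : y ≤ j := List.rel_of_pairwise_cons hb hj
    have e1 : |x - y| = y - x := by rw [abs_of_nonpos (by omega)]; ring
    have e2 : |x - j| = j - x := by rw [abs_of_nonpos (by omega)]; ring
    calc min best |x - y| ≤ |x - y| := min_le_right _ _
      _ ≤ |x - j| := by omega
  | case4 x a y b best best' h ih =>
    intro ha hb
    have hb' := (List.pairwise_cons.mp hb).2
    rw [ih ha hb']
    have hperm : ((x :: a).flatMap (fun i => (y :: b).map (fun j => |i - j|))).Perm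
        ((x :: a).map (fun i => |i - y|) ++
          (x :: a).flatMap (fun i => b.map (fun j => |i - j|))) := by
      simpa only [List.map_cons] using
        flatMap_cons_perm (x :: a) (fun i => |i - y|) (fun i => b.map (fun j => |i - j|))
    rw [hperm.foldl_eq (rcomm := min_rcomm) best]
    rw [List.foldl_append]
    simp only [List.map_cons, List.foldl_cons]
    congr 1
    apply (foldl_min_const ?_).symm
    intro z hz
    obtain ⟨i, hi, rfl⟩ := List.mem_map.mp hz
    have hxi : x ≤ i := List.rel_of_pairwise_cons ha hi
    have hyx : y ≤ x := by omega
    have e1 : |x - y| = x - y := abs_of_nonneg (by omega)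
    have e2 : |i - y| = i - y := abs_of_nonneg (by omega)
    calc min best |x - y| ≤ |x - y| := min_le_right _ _
      _ ≤ |i - y| := by omega

-- ===== VERDICT (by name: the statement is the Claim_ definition above) =====
theorem minAbsoluteDifference_spec : Claim_equal_minAbsoluteDifference := by
  intro nums _
  unfold Spec_minAbsoluteDifference minAbsoluteDifference minAbsoluteDifference_alt
  rw [A_state]
  simp only
  have h1 := pairwise_le_idxWhereEq 1 nums
  have h2 := pairwise_le_idxWhereEq 2 nums
  unfold diffs
  cases hone : idxWhereEq 1 nums with
  | nil => simp
  | cons x a =>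
    cases htwo : idxWhereEq 2 nums with
    | nil =>
      have hz : List.flatMap (fun (_ : Int) => ([] : List Int)) a = [] := by simp
      simp [hz]
    | cons y b =>
      rw [hone] at h1
      rw [htwo] at h2
      have hshow : (match x :: a, y :: b with
          | [], _ => (-1 : Int)
          | _ :: _, [] => (-1 : Int)
          | x :: a, y :: b => tpMerge (x :: a) (y :: b) |x - y|) =
          tpMerge (x :: a) (y :: b) |x - y| := rfl
      rw [hshow, tpMerge_eq _ _ _ h1 h2]
      simp [omin, foldl_omin_some, min_self]
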